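-- pv_equiv track=rewrite | github.com/BalaShankar9/SecProbe | secprobe/agents/evolution.py | _function_wrap
-- ===== SOURCE A (Python) =====
-- def _function_wrap(payload: str, vuln_type: str) -> str:
--     if vuln_type == "sqli":
--         # Wrap string chars in CHAR()
--         if "'" in payload:
--             parts = payload.split("'")
--             for i in range(1, len(parts), 2):
--                 if parts[i] and len(parts[i]) <= 10:
--                     char_vals = ",".join(str(ord(c)) for c in parts[i])
--                     parts[i] = f"CHAR({char_vals})"
--             return "".join(parts)
--     return payload
-- ===== SOURCE B (Python) =====
-- def _function_wrap(payload: str, vuln_type: str) -> str: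
--     if vuln_type != "sqli" or "'" not in payload:
--         return payload
--     # single pass: buffer segments between quotes, flush with CHAR() when inside quotes
--     out = []
--     buf = []
--     inside = False
--
--     def flush():
--         if inside and 1 <= len(buf) <= 10:
--             out.append("CHAR(" + ",".join(str(ord(c)) for c in buf) + ")")
--         else:
--             out.append("".join(buf))
--
--     for ch in payload:
--         if ch == "'":
--             flush()
--             buf.clear()
--             inside = not inside
--         else:
--             buf.append(ch)
--     flush()
--     return "".join(out)
-- ===== Notes on version B (the rewrite author's own statement) =====
-- stated objective: alternative
-- what changed: Replaces split-on-quote + index-stride mutation of the parts list + join by a single character-by-character scan that buffers the current segment and flushes it (CHAR()-encoded when inside quotes and 1..10 chars long) at each quote and at the end.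
import Mathlib
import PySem

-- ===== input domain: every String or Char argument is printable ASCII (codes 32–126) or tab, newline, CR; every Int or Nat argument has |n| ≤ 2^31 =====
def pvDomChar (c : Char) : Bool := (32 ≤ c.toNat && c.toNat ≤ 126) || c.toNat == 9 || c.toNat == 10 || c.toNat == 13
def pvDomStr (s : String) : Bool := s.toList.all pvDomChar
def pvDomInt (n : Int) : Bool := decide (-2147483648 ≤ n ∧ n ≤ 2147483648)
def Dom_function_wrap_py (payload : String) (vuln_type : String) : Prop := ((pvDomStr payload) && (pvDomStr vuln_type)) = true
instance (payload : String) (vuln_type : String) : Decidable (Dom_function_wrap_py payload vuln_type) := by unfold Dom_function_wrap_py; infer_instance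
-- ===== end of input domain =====

-- B replaces split + stride-2 in-place rewriting + join by a single left-to-right scan with a
-- segment buffer and an inside-quotes flag (same O(n) cost, different decomposition).

-- ===== PORT A =====
-- "CHAR(" ++ ",".join(str(ord(c)) for c in s) ++ ")"  (shared rendering of one quoted segment)
def pvCharWrap (s : List Char) : List Char :=
  "CHAR(".toList ++ PySem.Chars.join [','] (s.map (fun c => PySem.Int.toChars (c.toNat : Int))) ++ [')']

def function_wrap_py (payload : String) (vuln_type : String) : String :=
  if vuln_type == "sqli" then
    if PySem.Chars.isIn ['\''] payload.toList then
      let parts := PySem.Chars.splitOn payload.toList ['\'']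
      let parts2 := (PySem.List.pyRange 1 (PySem.List.len parts) 2).foldl
        (fun ps i =>
          let p := PySem.List.pyGetD ps i []
          if p ≠ [] ∧ p.length ≤ 10 then PySem.List.pySetD ps i (pvCharWrap p) else ps) parts
      String.mk (PySem.Chars.join [] parts2)
    else payload
  else payload

-- ===== PORT B =====
def pvFlush (buf : List Char) (inside : Bool) : List Char :=
  if inside && (1 ≤ buf.length && buf.length ≤ 10) then pvCharWrap buf else buf

def pvScan (acc buf : List Char) (inside : Bool) : List Char → List Char
  | [] => acc ++ pvFlush buf inside
  | c :: rest =>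
    if c = '\'' then pvScan (acc ++ pvFlush buf inside) [] (!inside) rest
    else pvScan acc (buf ++ [c]) inside rest

def function_wrap_py_alt (payload : String) (vuln_type : String) : String :=
  if vuln_type == "sqli" && PySem.Chars.isIn ['\''] payload.toList then
    String.mk (pvScan [] [] false payload.toList)
  else payload

-- ===== PRECONDITION & SPEC =====
def Spec_function_wrap_py (payload : String) (vuln_type : String) (out : String) : Prop := out = function_wrap_py_alt payload vuln_type
instance (payload : String) (vuln_type : String) (out : String) : Decidable (Spec_function_wrap_py payload vuln_type out) := by unfold Spec_function_wrap_py; infer_instance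

-- ===== CLAIM (what is proved, stated in full; the proofs are below) =====
def Claim_equal_function_wrap_py : Prop := ∀ (payload : String) (vuln_type : String), Dom_function_wrap_py payload vuln_type → Spec_function_wrap_py payload vuln_type (function_wrap_py payload vuln_type)

-- ===== LEMMAS AND PROOFS =====

-- first segment / remaining segments of l split at q
def pvSplit (q : Char) : List Char → List Char × List (List Char)
  | [] => ([], [])
  | c :: t =>
    let p := pvSplit q t
    if c = q then ([], p.1 :: p.2) else (c :: p.1, p.2)

def pvTransform (s : List Char) : List Char :=
  if s ≠ [] ∧ s.length ≤ 10 then pvCharWrap s else s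

def pvMapAlt : Bool → List (List Char) → List (List Char)
  | _, [] => []
  | b, s :: t => (if b then pvTransform s else s) :: pvMapAlt (!b) t

theorem pvFlush_eq (buf : List Char) (inside : Bool) :
    pvFlush buf inside = if inside then pvTransform buf else buf := by
  cases inside <;> simp [pvFlush, pvTransform] <;> cases buf <;> simp

theorem pvJoin_nil (xs : List (List Char)) : PySem.Chars.join [] xs = xs.flatten := by
  induction xs with
  | nil => rfl
  | cons a t ih =>
    cases t with
    | nil => simp [PySem.Chars.join, List.intercalate, List.intersperse]
    | cons b u =>
      simp only [PySem.Chars.join, List.intercalate, List.intersperse] at *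
      simp_all

theorem pvSplitOn_go_eq : ∀ (fuel : Nat) (l cur : List Char) (acc : List (List Char)),
    l.length < fuel →
    PySem.Chars.splitOn.go ['\''] fuel l cur acc
      = acc.reverse ++ (cur.reverse ++ (pvSplit '\'' l).1) :: (pvSplit '\'' l).2 := by
  intro fuel
  induction fuel with
  | zero => intro l cur acc h; omega
  | succ n ih =>
    intro l cur acc h
    cases l with
    | nil => simp [PySem.Chars.splitOn.go, pvSplit]
    | cons c rest =>
      by_cases hc : c = '\''
      · subst hc
        rw [PySem.Chars.splitOn.go]
        have hp : ['\''].isPrefixOf ('\'' :: rest) = true := by simp [List.isPrefixOf]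
        rw [if_pos hp]
        simp only [List.length_cons, List.length_nil, List.drop_succ_cons, List.drop_zero]
        rw [ih rest [] (cur.reverse :: acc) (by simpa using Nat.lt_of_succ_lt_succ h)]
        simp [pvSplit]
      · rw [PySem.Chars.splitOn.go]
        have hpre : ['\''].isPrefixOf (c :: rest) = false := by
          simp [List.isPrefixOf]; exact fun h' => (hc h'.symm).elim
        simp only [hpre, Bool.false_eq_true, if_false]
        rw [ih rest (c :: cur) acc (by simpa using Nat.lt_of_succ_lt_succ h)]
        simp [pvSplit, hc]

theorem pvSplitOn_eq (l : List Char) :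
    PySem.Chars.splitOn l ['\''] = (pvSplit '\'' l).1 :: (pvSplit '\'' l).2 := by
  have := pvSplitOn_go_eq (l.length + 1) l [] [] (Nat.lt_succ_self _)
  simpa [PySem.Chars.splitOn] using this

theorem pvScan_eq : ∀ (l acc buf : List Char) (inside : Bool),
    pvScan acc buf inside l
      = acc ++ (pvMapAlt inside ((buf ++ (pvSplit '\'' l).1) :: (pvSplit '\'' l).2)).flatten := by
  intro l
  induction l with
  | nil => intro acc buf inside; simp [pvScan, pvSplit, pvMapAlt, pvFlush_eq]
  | cons c rest ih =>
    intro acc buf inside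
    by_cases hc : c = '\''
    · subst hc
      rw [pvScan, if_pos rfl, ih]
      simp [pvSplit, pvMapAlt, pvFlush_eq]
    · rw [pvScan, if_neg hc, ih]
      simp [pvSplit, hc, pvMapAlt]

theorem pvRange_two_cons (a b : Int) (h : a < b) :
    PySem.List.pyRange a b 2 = a :: PySem.List.pyRange (a + 2) b 2 := by
  rw [PySem.List.pyRange_of_pos _ _ (by norm_num), PySem.List.pyRange_of_pos _ _ (by norm_num)]
  have h1 : ((b - a + 2 - 1) / 2).toNat = ((b - (a + 2) + 2 - 1) / 2).toNat + 1 := by omega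
  by_cases h2 : a + 2 < b
  · rw [if_pos h, if_pos h2, h1, List.range_succ_eq_map]
    simp only [List.map_cons, List.map_map, Nat.cast_zero, mul_zero, add_zero]
    congr 1
    apply List.map_congr_left; intro k _; simp [Function.comp]; push_cast; ring
  · have e1 : ((b - a + 2 - 1) / 2).toNat = 1 := by omega
    have e2 : (if a + 2 < b then ((b - (a + 2) + 2 - 1) / 2).toNat else 0) = 0 := by
      rw [if_neg h2]
    rw [if_pos h, e1, e2]
    simp

-- the stride-2 set loop of A rewrites exactly the odd positions
theorem pvFoldl_odd : ∀ (n : Nat) (ss pre : List (List Char)), ss.length ≤ n →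
    (PySem.List.pyRange (pre.length : Int) ((pre.length : Int) + (ss.length : Int)) 2).foldl
      (fun ps i =>
        let p := PySem.List.pyGetD ps i []
        if p ≠ [] ∧ p.length ≤ 10 then PySem.List.pySetD ps i (pvCharWrap p) else ps) (pre ++ ss)
    = pre ++ pvMapAlt true ss := by
  intro n
  induction n with
  | zero =>
    intro ss pre h
    have : ss = [] := List.length_eq_zero_iff.mp (Nat.le_zero.mp h)
    subst this
    simp [PySem.List.pyRange_of_pos, pvMapAlt]
  | succ n ih =>
    intro ss pre h
    match ss with
    | [] => simp [PySem.List.pyRange_of_pos, pvMapAlt]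
    | [s0] =>
      rw [pvRange_two_cons _ _ (by simp only [List.length_cons, List.length_nil]; push_cast; omega)]
      have hget : PySem.List.pyGetD (pre ++ [s0]) (pre.length : Int) [] = s0 := by
        simp [PySem.List.pyGetD_natCast, List.getD_eq_getElem?_getD, List.getElem?_append_right]
      have hrest : PySem.List.pyRange ((pre.length : Int) + 2) ((pre.length : Int) + 1) 2 = [] := by
        rw [PySem.List.pyRange_of_pos _ _ (by norm_num)]
        rw [if_neg (by omega)]; rfl
      simp only [List.length_cons, List.length_nil, Nat.cast_add, Nat.cast_ofNat, Nat.cast_one,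
        Nat.cast_zero, zero_add, List.foldl_cons, hget]
      by_cases hcond : s0 ≠ [] ∧ s0.length ≤ 10
      · rw [if_pos hcond]
        simp only [PySem.List.pySetD_natCast, List.set_append_right _ _ (Nat.le_refl _)]
        simp only [Nat.sub_self, List.set_cons_zero]
        rw [hrest]
        simp [pvMapAlt, pvTransform, hcond]
      · rw [if_neg hcond]
        rw [hrest]
        simp [pvMapAlt, pvTransform, hcond]
    | s0 :: s1 :: t =>
      rw [pvRange_two_cons _ _ (by simp only [List.length_cons, List.length_nil]; push_cast; omega)]
      have hget : PySem.List.pyGetD (pre ++ s0 :: s1 :: t) (pre.length : Int) [] = s0 := by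
        simp [PySem.List.pyGetD_natCast, List.getD_eq_getElem?_getD, List.getElem?_append_right]
      have hlen : t.length ≤ n := by simp only [List.length_cons] at h; omega
      have step2 : ∀ (x : List Char),
          (PySem.List.pyRange ((pre.length : Int) + 2) ((pre.length : Int) + ((s0 :: s1 :: t).length : Int)) 2).foldl
            (fun ps i =>
              let p := PySem.List.pyGetD ps i []
              if p ≠ [] ∧ p.length ≤ 10 then PySem.List.pySetD ps i (pvCharWrap p) else ps)
            (pre ++ x :: s1 :: t)
          = (pre ++ [x, s1]) ++ pvMapAlt true t := by
        intro x
        have := ih t (pre ++ [x, s1]) hlen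
        have harg : ((pre ++ [x, s1]).length : Int) = (pre.length : Int) + 2 := by
          simp only [List.length_append, List.length_cons, List.length_nil]; push_cast; omega
        have harg2 : ((pre ++ [x, s1]).length : Int) + (t.length : Int)
            = (pre.length : Int) + ((s0 :: s1 :: t).length : Int) := by
          simp only [List.length_append, List.length_cons, List.length_nil]; push_cast; omega
        rw [harg2, harg] at this
        simpa using this
      simp only [List.foldl_cons, hget]
      by_cases hcond : s0 ≠ [] ∧ s0.length ≤ 10
      · rw [if_pos hcond]
        simp only [PySem.List.pySetD_natCast, List.set_append_right _ _ (Nat.le_refl _)]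
        simp only [Nat.sub_self, List.set_cons_zero]
        rw [step2 (pvCharWrap s0)]
        simp [pvMapAlt, pvTransform, hcond]
      · rw [if_neg hcond]
        rw [step2 s0]
        simp [pvMapAlt, pvTransform, hcond]

-- ===== VERDICT (by name: the statement is the Claim_ definition above) =====
theorem function_wrap_py_spec : Claim_equal_function_wrap_py := by
  intro payload vuln_type _
  unfold Spec_function_wrap_py function_wrap_py function_wrap_py_alt
  by_cases hv : vuln_type == "sqli"
  · by_cases hq : PySem.Chars.isIn ['\''] payload.toList
    · rw [if_pos hv, if_pos hq, if_pos (by simp [hv, hq])]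
      set l := payload.toList
      obtain ⟨s0, rest, hsplit⟩ : ∃ a b, pvSplit '\'' l = (a, b) := ⟨_, _, rfl⟩
      have hparts : PySem.Chars.splitOn l ['\''] = s0 :: rest := by
        rw [pvSplitOn_eq, hsplit]
      have hlen : (PySem.List.len (PySem.Chars.splitOn l ['\'']) : Int)
          = (([s0] : List (List Char)).length : Int) + (rest.length : Int) := by
        rw [hparts]; simp; omega
      have hfold := pvFoldl_odd rest.length rest [s0] (Nat.le_refl _)
      have h1 : (([s0] : List (List Char)).length : Int) = (1 : Int) := by simp
      rw [h1] at hfold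
      simp only [hparts, PySem.List.len_eq]
      have : (PySem.List.pyRange 1 ((s0 :: rest).length : Int) 2).foldl
          (fun ps i =>
            let p := PySem.List.pyGetD ps i []
            if p ≠ [] ∧ p.length ≤ 10 then PySem.List.pySetD ps i (pvCharWrap p) else ps)
          (s0 :: rest) = [s0] ++ pvMapAlt true rest := by
        have harg : ((s0 :: rest).length : Int) = (1 : Int) + (rest.length : Int) := by
          simp; omega
        rw [harg]
        simpa using hfold
      rw [this, pvJoin_nil, pvScan_eq, hsplit]
      simp [pvMapAlt]
    · rw [if_pos hv, if_neg hq, if_neg (by simp [hq])]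
  · rw [if_neg hv, if_neg (by simp [hv])]
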